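-- pv_equiv track=rewrite | github.com/Shaik-Muj/DSA | Leetcode/Python/_16.py | helper
-- ===== SOURCE A (Python) =====
-- def helper(nums, value) -> int:
--     n = len(nums)
--     remainders = {}
--
--     for i in range(n):
--         rem = ((nums[i]%value)+value)%value
--         remainders[rem] = remainders.get(rem,0)+1
--
--     x=0
--     while True:
--         rem = x%value
--         if rem not in remainders :
--             break
--         else :
--             count = remainders.get(rem)
--             if count == 1:
--                 remainders.pop(rem)
--             else :
--                 remainders[rem] = count - 1
--
--             x += 1
--
--     return x
-- ===== SOURCE B (Python) =====
-- def helper(nums, value) -> int: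
--     # Closed form: for each residue class o (mod m=|value|) holding c_o values, the scan
--     # breaks at o + c_o*m, so the answer is min(o + c_o*m) over o in range(m).
--     # Only o <= len(nums) can attain the minimum (some class in [0, len(nums)] is empty
--     # and contributes just o), so the range is capped at min(m, len(nums)+1).
--     m = abs(value)
--     counts = {}
--     for num in nums:
--         o = num % m
--         counts[o] = counts.get(o, 0) + 1
--     return min(o + counts.get(o, 0) * m for o in range(min(m, len(nums) + 1)))
-- ===== Notes on version B (the rewrite author's own statement) =====
-- stated objective: alternative
-- what changed: Replaces A's step-by-step while-loop simulation (decrementing dict counts while walking x upward) with a closed form: count each residue class mod |value| once and return min(o + count_o*|value|) over residues o, capped at min(|value|, len(nums)+1) since some class there is empty.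
import Mathlib
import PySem

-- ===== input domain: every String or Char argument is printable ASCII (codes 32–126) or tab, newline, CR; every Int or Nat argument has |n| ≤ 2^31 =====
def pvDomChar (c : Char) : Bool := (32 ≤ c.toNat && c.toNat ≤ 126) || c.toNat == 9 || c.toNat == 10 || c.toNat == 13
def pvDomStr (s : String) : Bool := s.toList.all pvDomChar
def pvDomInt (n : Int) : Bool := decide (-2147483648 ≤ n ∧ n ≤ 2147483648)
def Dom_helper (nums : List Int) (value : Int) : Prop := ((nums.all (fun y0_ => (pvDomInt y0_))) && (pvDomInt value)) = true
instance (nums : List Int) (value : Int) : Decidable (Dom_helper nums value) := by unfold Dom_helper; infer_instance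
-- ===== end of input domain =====

-- B replaces A's step-by-step while-loop simulation by a closed form: count each
-- residue class mod |value| once and return min(o + count_o*|value|) over the residues.


-- ===== PORT A =====
-- first loop of A: 'for i in range(n): rem = ((nums[i]%value)+value)%value; remainders[rem] = remainders.get(rem,0)+1'
-- (the index loop visits exactly nums[0], nums[1], …, so it is the fold over nums)
def buildA (nums : List Int) (value : Int) : PySem.Dict Int Int :=
  nums.foldl (fun d num =>
    let rem := PySem.Int.mod (PySem.Int.mod num value + value) value
    d.insert rem (d.getD rem 0 + 1)) PySem.Dict.empty

-- A's while loop; each non-break iteration consumes one unit of count, so it performs at most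
-- (sum of counts) = nums.length iterations: fuel nums.length + 1 always suffices (proved below).
def loopA (value : Int) (x : Int) (d : PySem.Dict Int Int) : Nat → Int
  | 0 => x   -- never reached with the fuel helper supplies
  | fuel + 1 =>
    let rem := PySem.Int.mod x value
    match d.get? rem with
    | none => x
    | some count =>
      if count = 1 then loopA value (x + 1) (d.erase rem) fuel
      else loopA value (x + 1) (d.insert rem (count - 1)) fuel

def helper (nums : List Int) (value : Int) : Int :=
  loopA value 0 (buildA nums value) (nums.length + 1)

-- ===== PORT B =====
def helper_alt (nums : List Int) (value : Int) : Int :=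
  let m := |value|
  let counts := nums.foldl (fun d num =>
    let o := PySem.Int.mod num m
    d.insert o (d.getD o 0 + 1)) PySem.Dict.empty
  match PySem.List.min? ((PySem.List.pyRange 0 (min m (nums.length + 1)) 1).map
      (fun o => o + counts.getD o 0 * m)) (fun y => y) with
  | some v => v
  | none => 0   -- min() of an empty range: only when value = 0, outside Pre_ (Python raises)
-- (the range cap min m (len+1) is part of B's algorithm: some class in [0, len] is empty,
-- so no o beyond it can attain the minimum)

-- ===== PRECONDITION & SPEC =====
-- Python A raises ZeroDivisionError exactly when value = 0 (B also raises there).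
def Pre_helper (nums : List Int) (value : Int) : Prop := value ≠ 0
instance (nums : List Int) (value : Int) : Decidable (Pre_helper nums value) := by unfold Pre_helper; infer_instance
def pvWitness_helper : List Int × Int := ([3, 1, 4, 1], 2)

def Spec_helper (nums : List Int) (value : Int) (out : Int) : Prop := out = helper_alt nums value
instance (nums : List Int) (value : Int) (out : Int) : Decidable (Spec_helper nums value out) := by unfold Spec_helper; infer_instance

-- ===== CLAIM (what is proved, stated in full; the proofs are below) =====
def Claim_equal_helper : Prop := ∀ (nums : List Int) (value : Int), Dom_helper nums value → Pre_helper nums value → Spec_helper nums value (helper nums value)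

-- ===== LEMMAS AND PROOFS =====

-- residue count function of nums modulo m, and the canonical representative map ψ o = o % value
def cnt (nums : List Int) (m : Int) (o : Int) : Nat :=
  (nums.map (fun z => PySem.Int.mod z m)).count o

-- loop invariant: the dict stores, at key (o % value), exactly the (positive) remaining count of class o
def DInv (value : Int) (d : PySem.Dict Int Int) (c : Int → Nat) : Prop :=
  ∀ o : Int, 0 ≤ o → o < |value| →
    d.get? (PySem.Int.mod o value) = if c o = 0 then none else some ((c o : Int))

-- total remaining count (the loop's termination measure)
def cSum (m : Nat) (c : Int → Nat) : Nat := ∑ i ∈ Finset.range m, c (i : Int)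

-- the closed-form value the loop computes from state (x, c)
def gmin (value : Int) (c : Int → Nat) (x : Int) : Int :=
  match PySem.List.min? ((PySem.List.pyRange 0 |value| 1).map
      (fun o => x + PySem.Int.mod (o - x) |value| + (c o : Int) * |value|)) (fun y => y) with
  | some v => v
  | none => x


-- dict erase behaves as removal (no PySem lemma exists for erase; proved from the definition)
theorem get?_erase_self {κ ν : Type} [BEq κ] [LawfulBEq κ] (d : PySem.Dict κ ν) (k : κ) :
    (d.erase k).get? k = none := by
  simp only [PySem.Dict.erase, PySem.Dict.get?, Option.map_eq_none_iff, List.find?_eq_none]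
  intro p hp
  simp only [List.mem_filter] at hp
  simpa using hp.2

theorem get?_erase_of_ne {κ ν : Type} [BEq κ] [LawfulBEq κ] (d : PySem.Dict κ ν) (k j : κ)
    (h : j ≠ k) : (d.erase k).get? j = d.get? j := by
  simp only [PySem.Dict.erase, PySem.Dict.get?]
  congr 1
  induction d.items with
  | nil => rfl
  | cons p rest ih =>
    by_cases hk : p.1 = k
    · have hj : (k == j) = false := by simp [Ne.symm h]
      simp [hk, hj, ih]
    · simp only [List.filter_cons, show (!p.1 == k) = true by simp [hk], if_pos]
      by_cases hp : p.1 = j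
      · simp [hp]
      · simp [show (p.1 == j) = false by simp [hp], ih]

-- ψ o := o % value factors x % value through x % |value|
theorem mod_abs_factor (value x : Int) :
    PySem.Int.mod (PySem.Int.mod x |value|) value = PySem.Int.mod x value := by
  simp only [PySem.Int.mod]
  exact Int.fmod_fmod_of_dvd x ((dvd_abs _ _).mpr dvd_rfl)

-- key normalisation in A's first loop: ((z % value) + value) % value = z % value
theorem key_norm (value z : Int) :
    PySem.Int.mod (PySem.Int.mod z value + value) value = PySem.Int.mod z value := by
  simp only [PySem.Int.mod]
  have h1 : (z.fmod value + value * 1).fmod value = (z.fmod value).fmod value :=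
    Int.add_mul_fmod_self_left _ _ _
  simpa [Int.fmod_fmod_of_dvd z dvd_rfl] using h1

-- ψ is injective on [0, |value|)
theorem psi_inj {value o1 o2 : Int} (h1 : 0 ≤ o1) (h1' : o1 < |value|) (h2 : 0 ≤ o2)
    (h2' : o2 < |value|) (h : PySem.Int.mod o1 value = PySem.Int.mod o2 value) : o1 = o2 := by
  simp only [PySem.Int.mod] at h
  have d1 : o1 - o1.fmod value = value * o1.fdiv value := by
    have := Int.fmod_add_mul_fdiv o1 value; omega
  have d2 : o2 - o2.fmod value = value * o2.fdiv value := by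
    have := Int.fmod_add_mul_fdiv o2 value; omega
  have hdvd : value ∣ o1 - o2 := by
    have : o1 - o2 = value * o1.fdiv value - value * o2.fdiv value := by omega
    exact this ▸ Dvd.dvd.sub (Dvd.intro _ rfl) (Dvd.intro _ rfl)
  have := Int.eq_zero_of_dvd_of_natAbs_lt_natAbs hdvd
  by_contra hne
  have hlt : (o1 - o2).natAbs < value.natAbs := by
    have := Int.abs_eq_natAbs value
    omega
  have := this hlt
  omega

-- the residue x % |value| lies in [0, |value|)
theorem mod_abs_mem (value x : Int) (hv : value ≠ 0) :
    0 ≤ PySem.Int.mod x |value| ∧ PySem.Int.mod x |value| < |value| :=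
  ⟨PySem.Int.mod_nonneg x (abs_pos.mpr hv), PySem.Int.mod_lt x (abs_pos.mpr hv)⟩

-- A's first loop builds exactly the residue counter (viewed through ψ)
theorem buildA_get? (nums : List Int) (value : Int) (hv : value ≠ 0) :
    ∀ o : Int, 0 ≤ o → o < |value| →
    (buildA nums value).get? (PySem.Int.mod o value) =
      if cnt nums |value| o = 0 then none else some ((cnt nums |value| o : Int)) := by
  induction nums using List.reverseRecOn with
  | nil =>
    intro o _ _
    show PySem.Dict.empty.get? _ = _
    rw [PySem.Dict.get?_empty]
    simp [cnt]
  | append_singleton rest z ih =>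
    intro o ho ho'
    have hm : 0 < |value| := abs_pos.mpr hv
    obtain ⟨hz1, hz2⟩ := mod_abs_mem value z hv
    have hkey : PySem.Int.mod (PySem.Int.mod z value + value) value =
        PySem.Int.mod (PySem.Int.mod z |value|) value := by
      rw [key_norm, ← mod_abs_factor]
    have hstep : buildA (rest ++ [z]) value =
        (buildA rest value).insert (PySem.Int.mod (PySem.Int.mod z |value|) value)
          ((buildA rest value).getD (PySem.Int.mod (PySem.Int.mod z |value|) value) 0 + 1) := by
      unfold buildA
      rw [List.foldl_append, List.foldl_cons, List.foldl_nil]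
      simp only [hkey]
    have hcnt : cnt (rest ++ [z]) |value| o =
        cnt rest |value| o + (if o = PySem.Int.mod z |value| then 1 else 0) := by
      unfold cnt
      rw [List.map_append, List.count_append]
      simp only [List.map_cons, List.map_nil, List.count_cons, List.count_nil, beq_iff_eq,
        Nat.zero_add]
      by_cases h : o = PySem.Int.mod z |value|
      · simp [h]
      · rw [if_neg (fun hh => h hh.symm), if_neg h]
    have hgetD : (buildA rest value).getD (PySem.Int.mod (PySem.Int.mod z |value|) value) 0
        = (cnt rest |value| (PySem.Int.mod z |value|) : Int) := by
      rw [PySem.Dict.getD_eq_get?_getD, ih (PySem.Int.mod z |value|) hz1 hz2]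
      by_cases h : cnt rest |value| (PySem.Int.mod z |value|) = 0 <;> simp [h]
    rw [hstep, PySem.Dict.get?_insert]
    by_cases heq : o = PySem.Int.mod z |value|
    · rw [if_pos (by rw [heq]), hgetD,
        show cnt (rest ++ [z]) |value| o = cnt rest |value| (PySem.Int.mod z |value|) + 1 by
          rw [hcnt, if_pos heq, heq],
        if_neg (Nat.succ_ne_zero _)]
      norm_cast
    · have h2 : cnt (rest ++ [z]) |value| o = cnt rest |value| o := by
        rw [hcnt, if_neg heq, Nat.add_zero]
      rw [if_neg (fun hmod => heq (psi_inj ho ho' hz1 hz2 hmod)), h2, ih o ho ho']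

theorem sum_count_eq_length (mN : Nat) :
    ∀ L : List Int, (∀ e ∈ L, 0 ≤ e ∧ e < (mN : Int)) →
      (∑ i ∈ Finset.range mN, L.count (i : Int)) = L.length := by
  intro L
  induction L with
  | nil => simp
  | cons a L ih =>
    intro h
    have ha := h a (by simp)
    have hind : (∑ i ∈ Finset.range mN, if ((i : Int) = a) then 1 else 0) = 1 := by
      have : ∀ i ∈ Finset.range mN, (if ((i : Int) = a) then 1 else 0) =
          (if (i = a.toNat) then 1 else 0) := by
        intro i _
        by_cases hia : i = a.toNat
        · subst hia; simp [Int.toNat_of_nonneg ha.1]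
        · have : (i : Int) ≠ a := by omega
          simp [hia, this]
      rw [Finset.sum_congr rfl this, Finset.sum_ite_eq' (Finset.range mN) a.toNat (fun _ => 1)]
      simp only [Finset.mem_range]
      rw [if_pos (by omega)]
    calc (∑ i ∈ Finset.range mN, (a :: L).count (i : Int))
        = ∑ i ∈ Finset.range mN, (L.count (i : Int) + if ((i : Int) = a) then 1 else 0) := by
          apply Finset.sum_congr rfl
          intro i _
          rw [List.count_cons]
          congr 1
          by_cases hia : (i : Int) = a
          · simp [hia]
          · simp [beq_iff_eq, hia, Ne.symm hia]
      _ = L.length + 1 := by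
          rw [Finset.sum_add_distrib, ih (fun e he => h e (by simp [he])), hind]
      _ = (a :: L).length := by simp

theorem cSum_cnt (nums : List Int) (value : Int) (hv : value ≠ 0) :
    cSum |value|.toNat (cnt nums |value|) = nums.length := by
  have hm : 0 < |value| := abs_pos.mpr hv
  unfold cSum cnt
  rw [sum_count_eq_length |value|.toNat (nums.map (fun z => PySem.Int.mod z |value|))
    (by
      intro e he
      simp only [List.mem_map] at he
      obtain ⟨z, _, rfl⟩ := he
      have h1 := PySem.Int.mod_nonneg z hm
      have h2 := PySem.Int.mod_lt z hm
      constructor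
      · exact h1
      · rw [Int.toNat_of_nonneg (le_of_lt hm)]; exact h2)]
  simp

theorem cSum_update (m : Nat) (c : Int → Nat) (j : Nat) (hj : j < m) (k : Nat) :
    cSum m (Function.update c (j : Int) k) + c (j : Int) = cSum m c + k := by
  unfold cSum
  have hfe : ∀ i : Nat, Function.update c (j : Int) k (i : Int) =
      Function.update (fun i : Nat => c (i : Int)) j k i := by
    intro i
    by_cases hij : i = j
    · subst hij; simp [Function.update]
    · simp [Function.update, hij, show (i : Int) ≠ (j : Int) by exact_mod_cast hij]
  rw [Finset.sum_congr rfl (fun i _ => hfe i),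
    Finset.sum_update_of_mem (Finset.mem_range.mpr hj),
    Finset.sum_eq_sum_diff_singleton_add (Finset.mem_range.mpr hj) (fun i : Nat => c (i : Int))]
  omega

-- break case: when the count of x's own class is exhausted, the minimum is x itself
-- (ox - x) % |value| = 0 for ox = x % |value|
theorem mod_sub_self (value x : Int) (hv : value ≠ 0) :
    PySem.Int.mod (PySem.Int.mod x |value| - x) |value| = 0 := by
  have hm : 0 < |value| := abs_pos.mpr hv
  rw [PySem.Int.mod_eq_emod_of_pos hm, PySem.Int.mod_eq_emod_of_pos hm,
    Int.sub_emod, Int.emod_emod_of_dvd _ dvd_rfl, sub_self, Int.zero_emod]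

theorem gmin_break (value : Int) (hv : value ≠ 0) (c : Int → Nat) (x : Int)
    (h0 : c (PySem.Int.mod x |value|) = 0) : gmin value c x = x := by
  have hm : 0 < |value| := abs_pos.mpr hv
  obtain ⟨ho1, ho2⟩ := mod_abs_mem value x hv
  unfold gmin
  set f := fun o : Int => x + PySem.Int.mod (o - x) |value| + (c o : Int) * |value| with hf
  have hmemo : PySem.Int.mod x |value| ∈ PySem.List.pyRange 0 |value| 1 :=
    (PySem.List.mem_pyRange_one).mpr ⟨ho1, ho2⟩
  have hfx : f (PySem.Int.mod x |value|) = x := by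
    simp [hf, mod_sub_self value x hv, h0]
  have hxL : x ∈ (PySem.List.pyRange 0 |value| 1).map f := by
    rw [← hfx]; exact List.mem_map_of_mem hmemo
  have hlow : ∀ y ∈ (PySem.List.pyRange 0 |value| 1).map f, x ≤ y := by
    intro y hy
    obtain ⟨o, _, rfl⟩ := List.mem_map.mp hy
    have h1 := PySem.Int.mod_nonneg (o - x) hm
    have h2 : (0 : Int) ≤ (c o : Int) * |value| := by positivity
    simp only [hf]; omega
  obtain ⟨v, hvv⟩ : ∃ v, PySem.List.min? ((PySem.List.pyRange 0 |value| 1).map f) (fun y => y) = some v := by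
    cases hv' : PySem.List.min? ((PySem.List.pyRange 0 |value| 1).map f) (fun y => y) with
    | none =>
      exfalso
      have := (PySem.List.min?_eq_none_iff _ _).mp hv'
      rw [this] at hxL
      simp at hxL
    | some v => exact ⟨v, rfl⟩
  have h1 : v ≤ x := PySem.List.min?_isMin hvv x hxL
  have h2 : x ≤ v := hlow v (PySem.List.min?_mem hvv)
  rw [hvv]
  show v = x
  omega

-- step case: consuming one unit of x's class and advancing to x+1 preserves the minimum
theorem gmin_step (value : Int) (hv : value ≠ 0) (c : Int → Nat) (x : Int)
    (h0 : c (PySem.Int.mod x |value|) ≠ 0) :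
    gmin value (Function.update c (PySem.Int.mod x |value|) (c (PySem.Int.mod x |value|) - 1)) (x + 1)
      = gmin value c x := by
  have hm : 0 < |value| := abs_pos.mpr hv
  obtain ⟨hx1, hx2⟩ := mod_abs_mem value x hv
  set ox := PySem.Int.mod x |value| with hox
  have hc1 : 1 ≤ c ox := Nat.one_le_iff_ne_zero.mpr h0
  have hzero : (ox - x) % |value| = 0 := by
    have h := mod_sub_self value x hv
    rwa [PySem.Int.mod_eq_emod_of_pos hm] at h
  unfold gmin
  have hlist : ((PySem.List.pyRange 0 |value| 1).map
        (fun o => (x + 1) + PySem.Int.mod (o - (x + 1)) |value| +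
          (Function.update c ox (c ox - 1) o : Int) * |value|)) =
      ((PySem.List.pyRange 0 |value| 1).map
        (fun o => x + PySem.Int.mod (o - x) |value| + (c o : Int) * |value|)) := by
    apply List.map_congr_left
    intro o hor
    obtain ⟨ho1, ho2⟩ := (PySem.List.mem_pyRange_one).mp hor
    rw [PySem.Int.mod_eq_emod_of_pos hm, PySem.Int.mod_eq_emod_of_pos hm]
    by_cases heq : o = ox
    · rw [heq, Function.update_self, hzero]
      have e1 : (ox - (x + 1)) % |value| = (0 - 1 % |value|) % |value| := by
        rw [show ox - (x + 1) = (ox - x) - 1 by ring, Int.sub_emod, hzero]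
      by_cases hm1 : |value| = 1
      · rw [e1, hm1]
        push_cast [Nat.cast_sub hc1]
        simp
      · have hone : (1 : Int) % |value| = 1 := Int.emod_eq_of_lt (by omega) (by omega)
        have hneg : (0 - 1 % |value|) % |value| = |value| - 1 := by
          rw [hone]
          have h2 := Int.add_mul_emod_self_left (-1) |value| 1
          have h3 : (-1 + |value| * 1) % |value| = |value| - 1 := by
            rw [show -1 + |value| * 1 = |value| - 1 by ring]
            exact Int.emod_eq_of_lt (by omega) (by omega)
          rw [show (0 : Int) - 1 = -1 by ring, ← h3, h2]
        rw [e1, hneg]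
        push_cast [Nat.cast_sub hc1]
        ring
    · rw [Function.update_of_ne heq]
      have hr0 : (o - x) % |value| ≠ 0 := by
        intro h
        apply heq
        have hdvd : o % |value| = x % |value| :=
          Int.emod_eq_emod_iff_emod_sub_eq_zero.mpr h
        rw [hox, PySem.Int.mod_eq_emod_of_pos hm, ← hdvd, Int.emod_eq_of_lt ho1 ho2]
      have hr1 : 0 ≤ (o - x) % |value| := Int.emod_nonneg _ (by omega)
      have hr2 : (o - x) % |value| < |value| := Int.emod_lt_of_pos _ hm
      have hone : (1 : Int) % |value| = 1 := Int.emod_eq_of_lt (by omega) (by omega)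
      have e2 : (o - (x + 1)) % |value| = (o - x) % |value| - 1 := by
        rw [show o - (x + 1) = (o - x) - 1 by ring, Int.sub_emod, hone]
        exact Int.emod_eq_of_lt (by omega) (by omega)
      rw [e2]
      ring
  rw [hlist]
  have hne : ((PySem.List.pyRange 0 |value| 1).map
      (fun o => x + PySem.Int.mod (o - x) |value| + (c o : Int) * |value|)) ≠ [] := by
    intro h
    have := congrArg List.length h
    simp [PySem.List.length_pyRange_one] at this
    omega
  cases hmin : PySem.List.min? ((PySem.List.pyRange 0 |value| 1).map
      (fun o => x + PySem.Int.mod (o - x) |value| + (c o : Int) * |value|)) (fun y => y) with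
  | none => exact absurd ((PySem.List.min?_eq_none_iff _ _).mp hmin) hne
  | some v => rfl

theorem loop_eq (value : Int) (hv : value ≠ 0) :
    ∀ (fuel : Nat) (x : Int) (d : PySem.Dict Int Int) (c : Int → Nat),
      DInv value d c → cSum |value|.toNat c < fuel → loopA value x d fuel = gmin value c x := by
  intro fuel
  induction fuel with
  | zero => intro x d c _ h; omega
  | succ fuel ih =>
    intro x d c hinv hfuel
    have hm : 0 < |value| := abs_pos.mpr hv
    obtain ⟨hx1, hx2⟩ := mod_abs_mem value x hv
    have hget : d.get? (PySem.Int.mod x value) =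
        if c (PySem.Int.mod x |value|) = 0 then none
        else some ((c (PySem.Int.mod x |value|) : Int)) := by
      rw [← mod_abs_factor value x]
      exact hinv _ hx1 hx2
    by_cases h0 : c (PySem.Int.mod x |value|) = 0
    · rw [show loopA value x d (fuel + 1) = x by
        simp only [loopA]; rw [hget]; simp [h0]]
      exact (gmin_break value hv c x h0).symm
    · have hc1 : 1 ≤ c (PySem.Int.mod x |value|) := Nat.one_le_iff_ne_zero.mpr h0
      have hsum : cSum |value|.toNat
          (Function.update c (PySem.Int.mod x |value|) (c (PySem.Int.mod x |value|) - 1)) < fuel := by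
        have h := cSum_update |value|.toNat c (PySem.Int.mod x |value|).toNat
          (by omega) (c (PySem.Int.mod x |value|) - 1)
        rw [Int.toNat_of_nonneg hx1] at h
        omega
      have hA : loopA value x d (fuel + 1) =
          if ((c (PySem.Int.mod x |value|) : Int)) = 1 then
            loopA value (x + 1) (d.erase (PySem.Int.mod x value)) fuel
          else
            loopA value (x + 1)
              (d.insert (PySem.Int.mod x value) ((c (PySem.Int.mod x |value|) : Int) - 1)) fuel := by
        simp only [loopA]; rw [hget]; simp [h0]
      by_cases h1 : c (PySem.Int.mod x |value|) = 1
      · rw [hA, if_pos (by rw [h1]; norm_num)]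
        have hinv' : DInv value (d.erase (PySem.Int.mod x value))
            (Function.update c (PySem.Int.mod x |value|) (c (PySem.Int.mod x |value|) - 1)) := by
          intro o ho1 ho2
          by_cases heq : o = PySem.Int.mod x |value|
          · rw [heq, Function.update_self, mod_abs_factor value x, get?_erase_self]
            simp [h1]
          · rw [get?_erase_of_ne _ _ _
              (fun hmod => heq (psi_inj ho1 ho2 hx1 hx2 (hmod.trans (mod_abs_factor value x).symm))),
              Function.update_of_ne heq]
            exact hinv o ho1 ho2
        rw [ih (x + 1) _ _ hinv' hsum]
        exact gmin_step value hv c x h0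
      · rw [hA, if_neg (by exact_mod_cast h1)]
        have hinv' : DInv value
            (d.insert (PySem.Int.mod x value) ((c (PySem.Int.mod x |value|) : Int) - 1))
            (Function.update c (PySem.Int.mod x |value|) (c (PySem.Int.mod x |value|) - 1)) := by
          intro o ho1 ho2
          rw [PySem.Dict.get?_insert]
          by_cases heq : o = PySem.Int.mod x |value|
          · rw [if_pos (by rw [heq]; exact mod_abs_factor value x), heq, Function.update_self,
              if_neg (by omega)]
            congr 1
            push_cast [Nat.cast_sub hc1]
            ring
          · rw [if_neg (fun hmod => heq (psi_inj ho1 ho2 hx1 hx2 (hmod.trans (mod_abs_factor value x).symm))),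
              Function.update_of_ne heq]
            exact hinv o ho1 ho2
        rw [ih (x + 1) _ _ hinv' hsum]
        exact gmin_step value hv c x h0

theorem helper_alt_eq (nums : List Int) (value : Int) (hv : value ≠ 0) :
    helper_alt nums value = gmin value (cnt nums |value|) 0 := by
  have hm : 0 < |value| := abs_pos.mpr hv
  unfold helper_alt gmin
  dsimp only
  have hc : ∀ o : Int,
      (nums.foldl (fun d num =>
        d.insert (PySem.Int.mod num |value|)
          (d.getD (PySem.Int.mod num |value|) 0 + 1)) PySem.Dict.empty).getD o 0
        = (cnt nums |value| o : Int) := by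
    intro o
    have hfold : (nums.map (fun num => PySem.Int.mod num |value|)).foldl
        (fun (d : PySem.Dict Int Int) (k : Int) => d.insert k (d.getD k 0 + 1)) PySem.Dict.empty
        = nums.foldl (fun d num => d.insert (PySem.Int.mod num |value|)
            (d.getD (PySem.Int.mod num |value|) 0 + 1)) PySem.Dict.empty :=
      List.foldl_map
    rw [← hfold, PySem.Dict.getD_foldl_insert_add_one]
    simp [cnt, PySem.Dict.getD_empty]
  have hterm : ∀ K : Int, K ≤ |value| → ((PySem.List.pyRange 0 K 1).map
        (fun o => o + (nums.foldl (fun d num =>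
          d.insert (PySem.Int.mod num |value|)
            (d.getD (PySem.Int.mod num |value|) 0 + 1)) PySem.Dict.empty).getD o 0 * |value|)) =
      ((PySem.List.pyRange 0 K 1).map
        (fun o => 0 + PySem.Int.mod (o - 0) |value| + (cnt nums |value| o : Int) * |value|)) := by
    intro K hK
    apply List.map_congr_left
    intro o hor
    obtain ⟨ho1, ho2⟩ := (PySem.List.mem_pyRange_one).mp hor
    rw [hc o, sub_zero, PySem.Int.mod_eq_emod_of_pos hm, Int.emod_eq_of_lt ho1 (by omega)]
    ring
  by_cases hcap : |value| ≤ (nums.length : Int) + 1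
  · rw [min_eq_left hcap, hterm |value| le_rfl]
  · -- the capped range: some class o0 in [0, len+1) is empty, so the tail cannot attain the min
    have hKm : min |value| ((nums.length : Int) + 1) = (nums.length : Int) + 1 :=
      min_eq_right (by omega)
    rw [hKm, hterm ((nums.length : Int) + 1) (by omega)]
    set g := fun o : Int => 0 + PySem.Int.mod (o - 0) |value| + (cnt nums |value| o : Int) * |value|
      with hg
    have hgmod : ∀ o : Int, 0 ≤ o → o < |value| → g o = o + (cnt nums |value| o : Int) * |value| := by
      intro o ho1 ho2
      rw [hg]
      simp only [sub_zero]
      rw [PySem.Int.mod_eq_emod_of_pos hm, Int.emod_eq_of_lt ho1 ho2]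
      ring
    -- pigeonhole: an empty residue class below nums.length + 1
    obtain ⟨o0, ho01, ho02, ho0z⟩ :
        ∃ o0 : Int, 0 ≤ o0 ∧ o0 < (nums.length : Int) + 1 ∧ cnt nums |value| o0 = 0 := by
      by_contra hno
      push Not at hno
      have hall : ∀ i ∈ Finset.range (nums.length + 1), 1 ≤ cnt nums |value| (i : Int) := by
        intro i hi
        simp only [Finset.mem_range] at hi
        have := hno (i : Int) (by omega) (by omega)
        omega
      have h1 : (nums.length + 1 : Nat) ≤ ∑ i ∈ Finset.range (nums.length + 1), cnt nums |value| (i : Int) := by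
        calc (nums.length + 1 : Nat) = ∑ _i ∈ Finset.range (nums.length + 1), 1 := by simp
          _ ≤ _ := Finset.sum_le_sum hall
      have h2 : ∑ i ∈ Finset.range (nums.length + 1), cnt nums |value| (i : Int)
          ≤ cSum |value|.toNat (cnt nums |value|) := by
        unfold cSum
        apply Finset.sum_le_sum_of_subset
        intro t ht
        simp only [Finset.mem_range] at ht ⊢
        have habs : ((nums.length : Int) + 1) < |value| := not_le.mp hcap
        omega
      rw [cSum_cnt nums value hv] at h2
      omega
    have hsplit : PySem.List.pyRange 0 |value| 1 =
        PySem.List.pyRange 0 ((nums.length : Int) + 1) 1 ++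
          PySem.List.pyRange ((nums.length : Int) + 1) |value| 1 :=
      PySem.List.pyRange_one_append 0 ((nums.length : Int) + 1) |value| (by omega) (by omega)
    have ho0mem : g o0 ∈ (PySem.List.pyRange 0 ((nums.length : Int) + 1) 1).map g :=
      List.mem_map_of_mem ((PySem.List.mem_pyRange_one).mpr ⟨ho01, ho02⟩)
    have hgo0 : g o0 = o0 := by rw [hgmod o0 ho01 (by omega), ho0z]; push_cast; ring
    obtain ⟨vp, hvp⟩ : ∃ vp, PySem.List.min?
        ((PySem.List.pyRange 0 ((nums.length : Int) + 1) 1).map g) (fun y => y) = some vp := by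
      cases hmin : PySem.List.min? ((PySem.List.pyRange 0 ((nums.length : Int) + 1) 1).map g)
          (fun y => y) with
      | none =>
        exfalso
        have h := (PySem.List.min?_eq_none_iff _ _).mp hmin
        rw [h] at ho0mem
        simp at ho0mem
      | some v => exact ⟨v, rfl⟩
    obtain ⟨vf, hvf⟩ : ∃ vf, PySem.List.min?
        ((PySem.List.pyRange 0 |value| 1).map g) (fun y => y) = some vf := by
      cases hmin : PySem.List.min? ((PySem.List.pyRange 0 |value| 1).map g) (fun y => y) with
      | none =>
        exfalso
        have h := (PySem.List.min?_eq_none_iff _ _).mp hmin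
        rw [hsplit, List.map_append, List.append_eq_nil_iff] at h
        rw [h.1] at ho0mem
        simp at ho0mem
      | some v => exact ⟨v, rfl⟩
    rw [hvp, hvf]
    show vp = vf
    have hsub : ∀ y ∈ (PySem.List.pyRange 0 ((nums.length : Int) + 1) 1).map g,
        y ∈ (PySem.List.pyRange 0 |value| 1).map g := by
      intro y hy
      rw [hsplit, List.map_append, List.mem_append]
      exact Or.inl hy
    have h1 : vf ≤ vp :=
      PySem.List.min?_isMin hvf vp (hsub vp (PySem.List.min?_mem hvp))
    have h2 : vp ≤ vf := by
      have hvfmem := PySem.List.min?_mem hvf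
      rw [hsplit, List.map_append, List.mem_append] at hvfmem
      cases hvfmem with
      | inl hin => exact PySem.List.min?_isMin hvp vf hin
      | inr hin =>
        -- vf comes from the tail: vf = g o with o ≥ nums.length + 1 > o0 = g o0 ≥ vp
        obtain ⟨o, ho, rfl⟩ := List.mem_map.mp hin
        obtain ⟨hK1, hK2⟩ := (PySem.List.mem_pyRange_one).mp ho
        have hvp0 : vp ≤ o0 := hgo0 ▸ PySem.List.min?_isMin hvp (g o0) ho0mem
        have : o ≤ g o := by
          rw [hgmod o (by omega) hK2]
          have : (0 : Int) ≤ (cnt nums |value| o : Int) * |value| := by positivity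
          omega
        omega
    omega

-- ===== VERDICT (by name: the statement is the Claim_ definition above) =====
theorem helper_spec : Claim_equal_helper := by
  intro nums value _ hv
  unfold Spec_helper helper
  have hinv : DInv value (buildA nums value) (cnt nums |value|) := by
    intro o ho ho'
    exact buildA_get? nums value hv o ho ho'
  rw [loop_eq value hv _ 0 _ _ hinv (by rw [cSum_cnt nums value hv]; omega),
      helper_alt_eq nums value hv]
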